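-- pv_equiv track=rewrite | github.com/rzepinskip/spoiler-detection | spoiler_detection/datasets/utils.py | enforce_max_sent_per_example_legacy
-- ===== SOURCE A (Python) =====
-- def enforce_max_sent_per_example_legacy(sentences, labels=None, max_sentences=0):
--     """
--     Splits examples with len(sentences) > max_sentences into multiple smaller examples
--     with len(sentences) <= max_sentences.
--     Recursively split the list of sentences into two halves until each half
--     has len(sentences) < <= max_sentences. The goal is to produce splits that are of almost
--     equal size to avoid the scenario where all splits are of size
--     max_sentences then the last split is 1 or 2 sentences
--     This will result into losing context around the edges of each examples.
--     """
--     if labels is not None: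
--         assert len(sentences) == len(labels)
--
--     if len(sentences) > max_sentences and max_sentences > 0:
--         i = len(sentences) // 2
--         l1 = enforce_max_sent_per_example_legacy(
--             sentences[:i], None if labels is None else labels[:i], max_sentences
--         )
--         l2 = enforce_max_sent_per_example_legacy(
--             sentences[i:], None if labels is None else labels[i:], max_sentences
--         )
--         return l1 + l2
--     else:
--         return [(sentences, labels)]
-- ===== SOURCE B (Python) =====
-- def enforce_max_sent_per_example_legacy(sentences, labels=None, max_sentences=0):
--     if labels is not None:
--         assert len(sentences) == len(labels)
--     out = []
--     stack = [(sentences, labels)]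
--     while stack:
--         sen, lab = stack.pop()
--         if len(sen) > max_sentences and max_sentences > 0:
--             i = len(sen) // 2
--             stack.append((sen[i:], None if lab is None else lab[i:]))
--             stack.append((sen[:i], None if lab is None else lab[:i]))
--         else:
--             out.append((sen, lab))
--     return out
-- ===== Notes on version B (the rewrite author's own statement) =====
-- stated objective: alternative
-- what changed: Replaces A's binary recursion (recursive halving with list concatenation at every level) by a single iterative loop over an explicit worklist stack of (sentences, labels) chunks that appends finished chunks to an output accumulator.
import Mathlib
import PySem

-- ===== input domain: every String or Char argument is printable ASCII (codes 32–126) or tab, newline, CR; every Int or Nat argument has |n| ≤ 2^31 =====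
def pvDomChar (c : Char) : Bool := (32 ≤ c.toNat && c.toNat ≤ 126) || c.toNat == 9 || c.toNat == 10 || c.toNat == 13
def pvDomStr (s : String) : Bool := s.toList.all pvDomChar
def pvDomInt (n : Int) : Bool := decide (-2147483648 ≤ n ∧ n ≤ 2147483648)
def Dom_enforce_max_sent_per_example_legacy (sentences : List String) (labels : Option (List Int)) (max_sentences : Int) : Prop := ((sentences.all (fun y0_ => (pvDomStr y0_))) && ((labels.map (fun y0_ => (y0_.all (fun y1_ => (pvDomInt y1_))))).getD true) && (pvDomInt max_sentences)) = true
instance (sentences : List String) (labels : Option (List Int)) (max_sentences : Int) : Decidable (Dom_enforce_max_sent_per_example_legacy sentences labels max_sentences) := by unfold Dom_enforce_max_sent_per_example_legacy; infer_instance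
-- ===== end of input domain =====

-- B replaces A's binary recursion by a single iterative loop over an explicit worklist stack
-- (objective: alternative decomposition, same asymptotic cost).

-- helper facts about the half-point slices, cited by the ports' termination proofs
theorem pv_slice_half_to {α : Type} (xs : List α) (n : Nat) :
    PySem.List.slice xs none (some (PySem.Int.floordiv (n : Int) 2)) = xs.take (n / 2) := by
  have h : PySem.Int.floordiv (n : Int) 2 = ((n / 2 : Nat) : Int) := by
    exact_mod_cast PySem.Int.floordiv_natCast n 2
  rw [h, PySem.List.slice_to_natCast]

theorem pv_slice_half_from {α : Type} (xs : List α) (n : Nat) :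
    PySem.List.slice xs (some (PySem.Int.floordiv (n : Int) 2)) none = xs.drop (n / 2) := by
  have h : PySem.Int.floordiv (n : Int) 2 = ((n / 2 : Nat) : Int) := by
    exact_mod_cast PySem.Int.floordiv_natCast n 2
  rw [h, PySem.List.slice_from_natCast]

-- ===== PORT A =====
def enforce_max_sent_per_example_legacy (sentences : List String) (labels : Option (List Int)) (max_sentences : Int) : List (List String × Option (List Int)) :=
  if _h : (sentences.length : Int) > max_sentences ∧ max_sentences > 0 then
    let i : Int := PySem.Int.floordiv (sentences.length : Int) 2
    let l1 := enforce_max_sent_per_example_legacy (PySem.List.slice sentences none (some i))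
      (match labels with | none => none | some l => some (PySem.List.slice l none (some i))) max_sentences
    let l2 := enforce_max_sent_per_example_legacy (PySem.List.slice sentences (some i) none)
      (match labels with | none => none | some l => some (PySem.List.slice l (some i) none)) max_sentences
    l1 ++ l2
  else [(sentences, labels)]
termination_by sentences.length
decreasing_by
  · rw [pv_slice_half_to]
    simp only [List.length_take]
    omega
  · rw [pv_slice_half_from]
    simp only [List.length_drop]
    omega

-- ===== PORT B =====
-- measure of the worklist, used for B's termination (and cited by the proofs below)
def pvMu (stack : List (List String × Option (List Int))) : Nat :=
  (stack.map (fun p => p.1.length * p.1.length + 1)).sum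

theorem pv_mu_lt (sen : List String) (X Y lab : Option (List Int))
    (rest : List (List String × Option (List Int))) (hn : 2 ≤ sen.length) :
    pvMu ((PySem.List.slice sen none (some (PySem.Int.floordiv (sen.length : Int) 2)), X) ::
          (PySem.List.slice sen (some (PySem.Int.floordiv (sen.length : Int) 2)) none, Y) :: rest)
      < pvMu ((sen, lab) :: rest) := by
  rw [pv_slice_half_to, pv_slice_half_from]
  simp only [pvMu, List.map_cons, List.sum_cons, List.length_take, List.length_drop]
  have hmin : min (sen.length / 2) sen.length = sen.length / 2 := by omega
  rw [hmin]
  obtain ⟨b, hb⟩ : ∃ b, sen.length - sen.length / 2 = b := ⟨_, rfl⟩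
  obtain ⟨a, ha⟩ : ∃ a, sen.length / 2 = a := ⟨_, rfl⟩
  have h1 : 1 ≤ a := by omega
  have h2 : 1 ≤ b := by omega
  have hab : sen.length = a + b := by omega
  rw [hb, ha, hab]
  nlinarith

-- Lean list head = top of Python's stack (Python pushes/pops at the end of its list).
def pvAltLoop (max_sentences : Int) (stack : List (List String × Option (List Int))) (out : List (List String × Option (List Int))) : List (List String × Option (List Int)) :=
  match stack with
  | [] => out
  | (sen, lab) :: rest =>
    if _h : (sen.length : Int) > max_sentences ∧ max_sentences > 0 then
      let i : Int := PySem.Int.floordiv (sen.length : Int) 2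
      pvAltLoop max_sentences
        ((PySem.List.slice sen none (some i),
            (match lab with | none => none | some l => some (PySem.List.slice l none (some i)))) ::
         (PySem.List.slice sen (some i) none,
            (match lab with | none => none | some l => some (PySem.List.slice l (some i) none))) :: rest) out
    else pvAltLoop max_sentences rest (out ++ [(sen, lab)])
termination_by pvMu stack
decreasing_by
  · exact pv_mu_lt sen _ _ lab rest (by omega)
  · simp only [pvMu, List.map_cons, List.sum_cons]; omega

def enforce_max_sent_per_example_legacy_alt (sentences : List String) (labels : Option (List Int)) (max_sentences : Int) : List (List String × Option (List Int)) :=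
  pvAltLoop max_sentences [(sentences, labels)] []

-- ===== PRECONDITION & SPEC =====
-- Pre_ excludes exactly the inputs where A's assert fails (AssertionError): labels given with a
-- length different from len(sentences).  (getD form: trivially true when labels is None.)
def Pre_enforce_max_sent_per_example_legacy (sentences : List String) (labels : Option (List Int)) (max_sentences : Int) : Prop :=
  (match labels with
   | none => true
   | some l => l.length == sentences.length) = true
instance (sentences : List String) (labels : Option (List Int)) (max_sentences : Int) : Decidable (Pre_enforce_max_sent_per_example_legacy sentences labels max_sentences) := by unfold Pre_enforce_max_sent_per_example_legacy; infer_instance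

def pvWitness_enforce_max_sent_per_example_legacy : List String × Option (List Int) × Int := (["a", "b", "c"], some [1, 2, 3], 2)

def Spec_enforce_max_sent_per_example_legacy (sentences : List String) (labels : Option (List Int)) (max_sentences : Int) (out : List (List String × Option (List Int))) : Prop := out = enforce_max_sent_per_example_legacy_alt sentences labels max_sentences
instance (sentences : List String) (labels : Option (List Int)) (max_sentences : Int) (out : List (List String × Option (List Int))) : Decidable (Spec_enforce_max_sent_per_example_legacy sentences labels max_sentences out) := by unfold Spec_enforce_max_sent_per_example_legacy; infer_instance

-- ===== CLAIM (what is proved, stated in full; the proofs are below) =====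
def Claim_equal_enforce_max_sent_per_example_legacy : Prop := ∀ (sentences : List String) (labels : Option (List Int)) (max_sentences : Int), Dom_enforce_max_sent_per_example_legacy sentences labels max_sentences → Pre_enforce_max_sent_per_example_legacy sentences labels max_sentences → Spec_enforce_max_sent_per_example_legacy sentences labels max_sentences (enforce_max_sent_per_example_legacy sentences labels max_sentences)

-- ===== LEMMAS AND PROOFS =====

theorem pv_loop_inv (max_sentences : Int) :
    ∀ (N : Nat) (stack out : List (List String × Option (List Int))), pvMu stack ≤ N →
      pvAltLoop max_sentences stack out =
        out ++ (stack.map (fun p => enforce_max_sent_per_example_legacy p.1 p.2 max_sentences)).flatten := by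
  intro N
  induction N with
  | zero =>
    intro stack out hle
    cases stack with
    | nil => simp [pvAltLoop]
    | cons p rest =>
      exfalso
      simp only [pvMu, List.map_cons, List.sum_cons] at hle
      omega
  | succ N ih =>
    intro stack out hle
    cases stack with
    | nil => simp [pvAltLoop]
    | cons p rest =>
      obtain ⟨sen, lab⟩ := p
      rw [pvAltLoop]
      split
      case isTrue h =>
        have hn : 2 ≤ sen.length := by omega
        refine Eq.trans (ih _ out ?_) ?_
        · exact Nat.lt_succ_iff.mp (Nat.lt_of_lt_of_le (pv_mu_lt sen _ _ lab rest hn) hle)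
        · simp only [List.map_cons, List.flatten_cons]
          conv_rhs => rw [enforce_max_sent_per_example_legacy.eq_def, dif_pos h]
          simp [List.append_assoc]
      case isFalse h =>
        have hrest : pvMu rest ≤ N := by
          simp only [pvMu, List.map_cons, List.sum_cons] at hle ⊢
          omega
        rw [ih rest (out ++ [(sen, lab)]) hrest]
        simp only [List.map_cons, List.flatten_cons]
        conv_rhs => rw [enforce_max_sent_per_example_legacy.eq_def, dif_neg h]
        simp

-- ===== VERDICT (by name: the statement is the Claim_ definition above) =====
theorem enforce_max_sent_per_example_legacy_spec : Claim_equal_enforce_max_sent_per_example_legacy := by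
  intro sentences labels max_sentences _ _
  unfold Spec_enforce_max_sent_per_example_legacy enforce_max_sent_per_example_legacy_alt
  rw [pv_loop_inv max_sentences (pvMu [(sentences, labels)]) _ _ le_rfl]
  simp
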